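-- pv_equiv track=rewrite | github.com/alclass/cxlots | fs/mathfs/metrics/museum/idxshapearea_circle_metric.py | get_col_n_row_counted_pos_dict_from_cardarray
-- ===== SOURCE A (Python) =====
-- import math
--
-- def extract_as_tupl_col1idx_n_row1idx_from_carddozen(n, low_high_limit=(1, 60)):
--   """
--   Example:
--     dozen = 15 => row_idx = 2, col_idx = 5
--     dozen = 10 => row_idx = 1, col_idx = 0
--     dozen = 1 => row_idx = 1, col_idx = 1
--     dozen = 11 => row_idx = 2, col_idx = 1
--     dozen = 60 => row_idx = 6, col_idx = 0
--   """
--   try: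
--     n = int(n)
--   except (TypeError, ValueError):
--     return None, None
--   if n < low_high_limit[0] or n > low_high_limit[1]:
--     return None, None
--   col1idx = ((n-1) % 10) + 1  # it's the same as the unit-digit
--   row1idx = math.ceil(n/10)  # notice that row1idx(10)=1 & row1idx(11)=2
--   return col1idx, row1idx
--
-- def get_col_n_row_1indices_from_cardarray(dozenarray):
--   row_1indices, column_1indices = [], []
--   for d in dozenarray:
--     col1idx, row1idx = extract_as_tupl_col1idx_n_row1idx_from_carddozen(d)
--     if col1idx is None or row1idx is None:
--       return [], []
--     column_1indices.append(col1idx)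
--     row_1indices.append(row1idx)
--   return column_1indices, row_1indices
--
-- def get_col_n_row_counted_pos_dict_from_cardarray(dozenarray):
--   col1indices, row1indices = get_col_n_row_1indices_from_cardarray(dozenarray)
--   col_count_dict, row_count_dict = {}, {}
--   for pos1idx in col1indices:
--     if pos1idx in col_count_dict:
--       col_count_dict[pos1idx] += 1
--     else:
--       col_count_dict[pos1idx] = 1
--   for pos1idx in row1indices:
--     if pos1idx in row_count_dict:
--       row_count_dict[pos1idx] += 1
--     else:
--       row_count_dict[pos1idx] = 1
--   return col_count_dict, row_count_dict
-- ===== SOURCE B (Python) =====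
-- import math
--
-- def extract_as_tupl_col1idx_n_row1idx_from_carddozen(n, low_high_limit=(1, 60)):
--   try:
--     n = int(n)
--   except (TypeError, ValueError):
--     return None, None
--   if n < low_high_limit[0] or n > low_high_limit[1]:
--     return None, None
--   col1idx = ((n-1) % 10) + 1
--   row1idx = math.ceil(n/10)
--   return col1idx, row1idx
--
-- def get_col_n_row_counted_pos_dict_from_cardarray(dozenarray):
--   col_count_dict, row_count_dict = {}, {}
--   for d in dozenarray:
--     col1idx, row1idx = extract_as_tupl_col1idx_n_row1idx_from_carddozen(d)
--     if col1idx is None or row1idx is None: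
--       return {}, {}
--     col_count_dict[col1idx] = col_count_dict.get(col1idx, 0) + 1
--     row_count_dict[row1idx] = row_count_dict.get(row1idx, 0) + 1
--   return col_count_dict, row_count_dict
-- ===== Notes on version B (the rewrite author's own statement) =====
-- stated objective: simpler
-- what changed: Fused A's three passes (build two index lists, then tally each into its dict in a separate loop) into one traversal that increments both count dicts directly, returning empty dicts immediately on the first out-of-range card.
import Mathlib
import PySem

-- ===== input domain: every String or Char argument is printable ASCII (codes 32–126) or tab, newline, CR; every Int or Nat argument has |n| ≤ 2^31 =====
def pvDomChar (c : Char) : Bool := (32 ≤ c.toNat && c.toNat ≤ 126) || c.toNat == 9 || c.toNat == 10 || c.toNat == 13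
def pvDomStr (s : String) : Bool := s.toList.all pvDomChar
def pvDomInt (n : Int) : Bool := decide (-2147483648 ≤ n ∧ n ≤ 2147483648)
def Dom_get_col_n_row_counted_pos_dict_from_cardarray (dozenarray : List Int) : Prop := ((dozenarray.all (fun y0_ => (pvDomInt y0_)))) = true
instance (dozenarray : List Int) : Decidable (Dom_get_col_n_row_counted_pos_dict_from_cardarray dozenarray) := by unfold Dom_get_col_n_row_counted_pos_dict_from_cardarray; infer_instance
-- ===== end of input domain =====

-- B fuses A's three passes (build two index lists, then tally each into its own dict)
-- into one traversal incrementing both count dicts; return value equivalence only.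

-- ===== PORT A =====
-- shared same-module helper extract_as_tupl_col1idx_n_row1idx_from_carddozen (both
-- Source A and Source B contain it verbatim): (None, None) is modelled as `none`.
-- math.ceil(n/10) is ported as integer ceiling -((-n)//10): exact here since the
-- guard restricts 1 ≤ n ≤ 60, where float division is exact.
def pvExtract (n : Int) : Option (Int × Int) :=
  if n < 1 ∨ 60 < n then none
  else some (PySem.Int.mod (n - 1) 10 + 1, -(PySem.Int.floordiv (-n) 10))

-- get_col_n_row_1indices_from_cardarray's loop: early return ([], []) on invalid
def pvIndicesLoop : List Int → List Int → List Int → (List Int × List Int)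
  | [], cols, rows => (cols, rows)
  | d :: ds, cols, rows =>
      match pvExtract d with
      | none => ([], [])
      | some (c, r) => pvIndicesLoop ds (cols ++ [c]) (rows ++ [r])

def get_col_n_row_counted_pos_dict_from_cardarray (dozenarray : List Int) : (List (Int × Int)) × (List (Int × Int)) :=
  let p := pvIndicesLoop dozenarray [] []
  let colDict := p.1.foldl (fun d x => d.insert x (d.getD x 0 + 1)) (PySem.Dict.empty : PySem.Dict Int Int)
  let rowDict := p.2.foldl (fun d x => d.insert x (d.getD x 0 + 1)) (PySem.Dict.empty : PySem.Dict Int Int)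
  (colDict.items, rowDict.items)

-- ===== PORT B =====
def pvLoopB : List Int → PySem.Dict Int Int → PySem.Dict Int Int → (List (Int × Int)) × (List (Int × Int))
  | [], cd, rd => (cd.items, rd.items)
  | d :: ds, cd, rd =>
      match pvExtract d with
      | none => ([], [])
      | some (c, r) => pvLoopB ds (cd.insert c (cd.getD c 0 + 1)) (rd.insert r (rd.getD r 0 + 1))

def get_col_n_row_counted_pos_dict_from_cardarray_alt (dozenarray : List Int) : (List (Int × Int)) × (List (Int × Int)) :=
  pvLoopB dozenarray PySem.Dict.empty PySem.Dict.empty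

-- ===== PRECONDITION & SPEC =====
def Spec_get_col_n_row_counted_pos_dict_from_cardarray (dozenarray : List Int) (out : (List (Int × Int)) × (List (Int × Int))) : Prop := out = get_col_n_row_counted_pos_dict_from_cardarray_alt dozenarray
instance (dozenarray : List Int) (out : (List (Int × Int)) × (List (Int × Int))) : Decidable (Spec_get_col_n_row_counted_pos_dict_from_cardarray dozenarray out) := by unfold Spec_get_col_n_row_counted_pos_dict_from_cardarray; infer_instance

-- ===== CLAIM (what is proved, stated in full; the proofs are below) =====
def Claim_equal_get_col_n_row_counted_pos_dict_from_cardarray : Prop := ∀ (dozenarray : List Int), Dom_get_col_n_row_counted_pos_dict_from_cardarray dozenarray → Spec_get_col_n_row_counted_pos_dict_from_cardarray dozenarray (get_col_n_row_counted_pos_dict_from_cardarray dozenarray)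

-- ===== LEMMAS AND PROOFS =====

def pvCol (n : Int) : Int := PySem.Int.mod (n - 1) 10 + 1
def pvRow (n : Int) : Int := -(PySem.Int.floordiv (-n) 10)

lemma pvExtract_valid {n : Int} (h : ¬ (n < 1 ∨ 60 < n)) : pvExtract n = some (pvCol n, pvRow n) := by
  simp [pvExtract, h, pvCol, pvRow]

lemma pvIndicesLoop_invalid (xs : List Int) (cols rows : List Int)
    (h : ∃ d ∈ xs, d < 1 ∨ 60 < d) : pvIndicesLoop xs cols rows = ([], []) := by
  induction xs generalizing cols rows with
  | nil => simp at h
  | cons d ds ih =>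
    by_cases hd : d < 1 ∨ 60 < d
    · simp [pvIndicesLoop, pvExtract, hd]
    · rw [pvIndicesLoop, pvExtract_valid hd]
      apply ih
      rcases h with ⟨x, hx, hr⟩
      rcases List.mem_cons.mp hx with rfl | hx'
      · exact absurd hr hd
      · exact ⟨x, hx', hr⟩

lemma pvLoopB_invalid (xs : List Int) (cd rd : PySem.Dict Int Int)
    (h : ∃ d ∈ xs, d < 1 ∨ 60 < d) : pvLoopB xs cd rd = ([], []) := by
  induction xs generalizing cd rd with
  | nil => simp at h
  | cons d ds ih =>
    by_cases hd : d < 1 ∨ 60 < d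
    · simp [pvLoopB, pvExtract, hd]
    · rw [pvLoopB, pvExtract_valid hd]
      apply ih
      rcases h with ⟨x, hx, hr⟩
      rcases List.mem_cons.mp hx with rfl | hx'
      · exact absurd hr hd
      · exact ⟨x, hx', hr⟩

lemma pvIndicesLoop_valid (xs : List Int) (cols rows : List Int)
    (h : ∀ d ∈ xs, ¬ (d < 1 ∨ 60 < d)) :
    pvIndicesLoop xs cols rows = (cols ++ xs.map pvCol, rows ++ xs.map pvRow) := by
  induction xs generalizing cols rows with
  | nil => simp [pvIndicesLoop]
  | cons d ds ih =>
    simp only [pvIndicesLoop, pvExtract_valid (h d (List.mem_cons_self))]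
    rw [ih _ _ (fun x hx => h x (List.mem_cons_of_mem _ hx))]
    simp

lemma pvLoopB_valid (xs : List Int) (cd rd : PySem.Dict Int Int)
    (h : ∀ d ∈ xs, ¬ (d < 1 ∨ 60 < d)) :
    pvLoopB xs cd rd =
      (((xs.map pvCol).foldl (fun d x => d.insert x (d.getD x 0 + 1)) cd).items,
       ((xs.map pvRow).foldl (fun d x => d.insert x (d.getD x 0 + 1)) rd).items) := by
  induction xs generalizing cd rd with
  | nil => simp [pvLoopB]
  | cons d ds ih =>
    simp only [pvLoopB, pvExtract_valid (h d (List.mem_cons_self))]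
    rw [ih _ _ (fun x hx => h x (List.mem_cons_of_mem _ hx))]
    simp [List.foldl_cons]

-- ===== VERDICT (by name: the statement is the Claim_ definition above) =====
theorem get_col_n_row_counted_pos_dict_from_cardarray_spec : Claim_equal_get_col_n_row_counted_pos_dict_from_cardarray := by
  intro xs _
  unfold Spec_get_col_n_row_counted_pos_dict_from_cardarray
  unfold get_col_n_row_counted_pos_dict_from_cardarray get_col_n_row_counted_pos_dict_from_cardarray_alt
  by_cases h : ∀ d ∈ xs, ¬ (d < 1 ∨ 60 < d)
  · rw [pvIndicesLoop_valid xs [] [] h, pvLoopB_valid xs _ _ h]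
    simp
  · push Not at h
    rcases h with ⟨d, hd, hr⟩
    have hx : ∃ d ∈ xs, d < 1 ∨ 60 < d := ⟨d, hd, by omega⟩
    rw [pvIndicesLoop_invalid xs [] [] hx, pvLoopB_invalid xs _ _ hx]
    simp [PySem.Dict.empty]
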